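-- pv_equiv track=rewrite | github.com/mixlo/anglerfish-maze | level_generator.py | convert_cmap_to_gmap
-- ===== SOURCE A (Python) =====
-- cmap_to_gmap = [[3,7],[1,6],[1,7],[1,5],
--                 [2,7],[0,5],[2,5],[0,6],
--                 [2,6],[1,4],[1,3],[0,3],
--                 [2,4],[0,4],[2,3],[4,1]]
--
-- def convert_cmap_to_gmap(cmap, rows, cols):
--     gmap = [[None for _ in range(cols)] for _ in range(rows)]
--     # All internal cells
--     for row in range(rows):
--         for col in range(cols):
--             gmap[row][col] = cmap_to_gmap[cmap[row][col]]
--     # All cells along leftmost and rightmost columns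
--     for r in range(1, rows-1):
--         if gmap[r][0]  == [3,7]: gmap[r][0]  = [4,0]
--         else                   : gmap[r][0]  = [1,2]
--         if gmap[r][-1] == [3,7]: gmap[r][-1] = [4,2]
--         else                   : gmap[r][-1] = [1,0]
--     # All cells along top and bottom rows
--     for c in range(1, cols-1):
--         if gmap[0][c]  == [3,7]: gmap[0][c]  = [3,1]
--         else                   : gmap[0][c]  = [2,1]
--         if gmap[-1][c] == [3,7]: gmap[-1][c] = [5,1]
--         else                   : gmap[-1][c] = [0,1]
--     # All corner cells
--     gmap[0][0]   = [3,0]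
--     gmap[0][-1]  = [3,2]
--     gmap[-1][0]  = [5,0]
--     gmap[-1][-1] = [5,2]
--     return gmap
-- ===== SOURCE B (Python) =====
-- cmap_to_gmap = [[3,7],[1,6],[1,7],[1,5],
--                 [2,7],[0,5],[2,5],[0,6],
--                 [2,6],[1,4],[1,3],[0,3],
--                 [2,4],[0,4],[2,3],[4,1]]
--
-- def _cell(cmap, rows, cols, r, c):
--     tile = cmap_to_gmap[cmap[r][c]]      # shared reference for interior cells
--     blocked = tile == [3, 7]
--     if c in (0, cols - 1):               # left/right border column
--         if c == cols - 1:
--             return [4, 2] if blocked else [1, 0]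
--         return [4, 0] if blocked else [1, 2]
--     if r in (0, rows - 1):               # top/bottom border row
--         if r == rows - 1:
--             return [5, 1] if blocked else [0, 1]
--         return [3, 1] if blocked else [2, 1]
--     return tile
--
-- def convert_cmap_to_gmap(cmap, rows, cols):
--     gmap = [[_cell(cmap, rows, cols, r, c) for c in range(cols)] for r in range(rows)]
--     gmap[0][0]   = [3, 0]
--     gmap[0][-1]  = [3, 2]
--     gmap[-1][0]  = [5, 0]
--     gmap[-1][-1] = [5, 2]
--     return gmap
-- ===== Notes on version B (the rewrite author's own statement) =====
-- stated objective: simpler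
-- what changed: A fills the whole grid from the lookup table and then destructively patches the left/right columns and top/bottom rows in two extra last-write-wins passes before fixing the corners; B computes each cell once in a single nested comprehension whose cell function dispatches on position (border column, border row, interior) and then assigns the four corners.
-- intended difference: On degenerate one-column (resp. one-row) grids whose interior border cell is blocked (cmap value indexing table entry [3,7]), A's second border write overwrites its first on the same cell and returns the open-edge tile [1,0] (resp. [0,1]) even though the cell is blocked, while B returns the blocked border tile [4,2] (resp. [5,1]), which is what the branch is plainly meant to produce. — e.g. on convert_cmap_to_gmap([[1], [0], [1]], 3, 1): A returns [[[3,2]], [[1,0]], [[5,2]]], B returns [[[3,2]], [[4,2]], [[5,2]]]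
import Mathlib
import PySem

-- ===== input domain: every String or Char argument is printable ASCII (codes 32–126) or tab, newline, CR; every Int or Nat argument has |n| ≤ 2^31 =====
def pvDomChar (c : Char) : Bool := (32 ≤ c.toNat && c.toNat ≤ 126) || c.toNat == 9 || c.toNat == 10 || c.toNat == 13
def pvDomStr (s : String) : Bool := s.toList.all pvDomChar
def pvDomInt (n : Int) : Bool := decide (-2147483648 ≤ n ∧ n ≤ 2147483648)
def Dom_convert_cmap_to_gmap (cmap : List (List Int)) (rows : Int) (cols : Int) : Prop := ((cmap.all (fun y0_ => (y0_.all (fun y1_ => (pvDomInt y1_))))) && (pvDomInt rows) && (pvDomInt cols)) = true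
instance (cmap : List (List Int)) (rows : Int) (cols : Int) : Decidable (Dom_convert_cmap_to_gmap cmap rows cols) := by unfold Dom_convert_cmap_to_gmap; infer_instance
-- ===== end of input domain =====

-- B replaces A's fill-then-patch border passes by one nested build with a positional cell function plus the four corner writes (same cost, simpler decomposition; return-value equivalence outside D_ — both leave interior cells aliased to the module table, aliasing is not modelled here).


-- the shared module-level table cmap_to_gmap
def cm2gm : List (List Int) := [[3,7],[1,6],[1,7],[1,5],[2,7],[0,5],[2,5],[0,6],[2,6],[1,4],[1,3],[0,3],[2,4],[0,4],[2,3],[4,1]]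

-- cmap_to_gmap[cmap[r][c]]  (pyGetD: in range under Pre_)
def tblLookup (cmap : List (List Int)) (r c : Int) : List Int :=
  PySem.List.pyGetD cm2gm (PySem.List.pyGetD (PySem.List.pyGetD cmap r []) c 0) []

-- ===== PORT A =====
-- gmap[r][c]  /  gmap[r][c] = v   (Python index semantics; in range under Pre_)
def aGet2 (g : List (List (List Int))) (r c : Int) : List Int :=
  PySem.List.pyGetD (PySem.List.pyGetD g r []) c []
def aSet2 (g : List (List (List Int))) (r c : Int) (v : List Int) : List (List (List Int)) :=
  PySem.List.pySetD g r (PySem.List.pySetD (PySem.List.pyGetD g r []) c v)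

def convert_cmap_to_gmap (cmap : List (List Int)) (rows : Int) (cols : Int) : List (List (List Int)) :=
  -- gmap = [[None]*...]: None cells modelled by [] — every cell is overwritten by the first loop under Pre_
  let gmap0 := (PySem.List.pyRange 0 rows 1).map (fun _ => (PySem.List.pyRange 0 cols 1).map (fun _ => ([] : List Int)))
  -- all internal cells
  let g1 := (PySem.List.pyRange 0 rows 1).foldl (fun g row =>
      (PySem.List.pyRange 0 cols 1).foldl (fun g col => aSet2 g row col (tblLookup cmap row col)) g) gmap0
  -- leftmost and rightmost columns
  let g2 := (PySem.List.pyRange 1 (rows-1) 1).foldl (fun g r =>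
      let g := if aGet2 g r 0 = [3,7] then aSet2 g r 0 [4,0] else aSet2 g r 0 [1,2]
      if aGet2 g r (-1) = [3,7] then aSet2 g r (-1) [4,2] else aSet2 g r (-1) [1,0]) g1
  -- top and bottom rows
  let g3 := (PySem.List.pyRange 1 (cols-1) 1).foldl (fun g c =>
      let g := if aGet2 g 0 c = [3,7] then aSet2 g 0 c [3,1] else aSet2 g 0 c [2,1]
      if aGet2 g (-1) c = [3,7] then aSet2 g (-1) c [5,1] else aSet2 g (-1) c [0,1]) g2
  -- corner cells
  let g4 := aSet2 g3 0 0 [3,0]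
  let g5 := aSet2 g4 0 (-1) [3,2]
  let g6 := aSet2 g5 (-1) 0 [5,0]
  aSet2 g6 (-1) (-1) [5,2]

-- ===== PORT B =====
def bCell (cmap : List (List Int)) (rows cols r c : Int) : List Int :=
  let tile := tblLookup cmap r c
  let blocked := tile = [3,7]
  let lastR := rows - 1
  let lastC := cols - 1
  if c = 0 ∨ c = lastC then
    (if c = lastC then (if blocked then [4,2] else [1,0])
     else (if blocked then [4,0] else [1,2]))
  else if r = 0 ∨ r = lastR then
    (if r = lastR then (if blocked then [5,1] else [0,1])
     else (if blocked then [3,1] else [2,1]))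
  else tile

def convert_cmap_to_gmap_alt (cmap : List (List Int)) (rows : Int) (cols : Int) : List (List (List Int)) :=
  let gmap := (PySem.List.pyRange 0 rows 1).map (fun r =>
    (PySem.List.pyRange 0 cols 1).map (fun c => bCell cmap rows cols r c))
  let g1 := aSet2 gmap 0 0 [3,0]
  let g2 := aSet2 g1 0 (-1) [3,2]
  let g3 := aSet2 g2 (-1) 0 [5,0]
  aSet2 g3 (-1) (-1) [5,2]

-- ===== PRECONDITION & SPEC =====
-- Pre_: exactly where Python A returns: at least one row and column (else the corner writes
-- raise IndexError), cmap supplies the rows*cols cells read, and each read value indexes the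
-- 16-entry table under Python semantics (negative values down to -16 wrap).
def Pre_convert_cmap_to_gmap (cmap : List (List Int)) (rows : Int) (cols : Int) : Prop :=
  1 ≤ rows ∧ 1 ≤ cols ∧ rows ≤ (cmap.length : Int) ∧
  ∀ row ∈ cmap.take rows.toNat, cols ≤ (row.length : Int) ∧
    ∀ v ∈ row.take cols.toNat, -16 ≤ v ∧ v < 16
instance (cmap : List (List Int)) (rows : Int) (cols : Int) : Decidable (Pre_convert_cmap_to_gmap cmap rows cols) := by unfold Pre_convert_cmap_to_gmap; infer_instance

def pvWitness_convert_cmap_to_gmap : List (List Int) × Int × Int := ([[0, 5], [15, -1]], 2, 2)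

-- On degenerate one-column (resp. one-row) grids whose interior border cell is blocked (cmap value
-- indexing table entry [3,7]), A's second border write overwrites its first on the same cell and
-- returns the open-edge tile [1,0] (resp. [0,1]) even though the cell is blocked, while B returns
-- the blocked border tile [4,2] (resp. [5,1]), which is what the branch is plainly meant to produce.
def D_convert_cmap_to_gmap (cmap : List (List Int)) (rows : Int) (cols : Int) : Prop :=
  (cols = 1 ∧ 3 ≤ rows ∧ ∃ r < rows.toNat - 1, 1 ≤ r ∧ ((cmap.getD r []).getD 0 1) % 16 = 0)
  ∨ (rows = 1 ∧ 3 ≤ cols ∧ ∃ c < cols.toNat - 1, 1 ≤ c ∧ ((cmap.getD 0 []).getD c 1) % 16 = 0)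
instance (cmap : List (List Int)) (rows : Int) (cols : Int) : Decidable (D_convert_cmap_to_gmap cmap rows cols) := by unfold D_convert_cmap_to_gmap; infer_instance

def Spec_convert_cmap_to_gmap (cmap : List (List Int)) (rows : Int) (cols : Int) (out : List (List (List Int))) : Prop := ¬ D_convert_cmap_to_gmap cmap rows cols → out = convert_cmap_to_gmap_alt cmap rows cols
instance (cmap : List (List Int)) (rows : Int) (cols : Int) (out : List (List (List Int))) : Decidable (Spec_convert_cmap_to_gmap cmap rows cols out) := by unfold Spec_convert_cmap_to_gmap; infer_instance

def pvDiffWitness_convert_cmap_to_gmap : List (List Int) × Int × Int := ([[1], [0], [1]], 3, 1)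
def pvDiffWitnessOut_convert_cmap_to_gmap : (List (List (List Int))) × (List (List (List Int))) :=
  ([[[3,2]], [[1,0]], [[5,2]]], [[[3,2]], [[4,2]], [[5,2]]])

-- ===== CLAIM (what is proved, stated in full; the proofs are below) =====
def Claim_unchanged_convert_cmap_to_gmap : Prop := ∀ (cmap : List (List Int)) (rows : Int) (cols : Int), Dom_convert_cmap_to_gmap cmap rows cols → Pre_convert_cmap_to_gmap cmap rows cols → Spec_convert_cmap_to_gmap cmap rows cols (convert_cmap_to_gmap cmap rows cols)
def Claim_changed_convert_cmap_to_gmap : Prop := Dom_convert_cmap_to_gmap (pvDiffWitness_convert_cmap_to_gmap.1) (pvDiffWitness_convert_cmap_to_gmap.2.1) (pvDiffWitness_convert_cmap_to_gmap.2.2) ∧ Pre_convert_cmap_to_gmap (pvDiffWitness_convert_cmap_to_gmap.1) (pvDiffWitness_convert_cmap_to_gmap.2.1) (pvDiffWitness_convert_cmap_to_gmap.2.2) ∧ D_convert_cmap_to_gmap (pvDiffWitness_convert_cmap_to_gmap.1) (pvDiffWitness_convert_cmap_to_gmap.2.1) (pvDiffWitness_convert_cmap_to_gmap.2.2) ∧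 convert_cmap_to_gmap (pvDiffWitness_convert_cmap_to_gmap.1) (pvDiffWitness_convert_cmap_to_gmap.2.1) (pvDiffWitness_convert_cmap_to_gmap.2.2) = pvDiffWitnessOut_convert_cmap_to_gmap.1 ∧ convert_cmap_to_gmap_alt (pvDiffWitness_convert_cmap_to_gmap.1) (pvDiffWitness_convert_cmap_to_gmap.2.1) (pvDiffWitness_convert_cmap_to_gmap.2.2) = pvDiffWitnessOut_convert_cmap_to_gmap.2 ∧ pvDiffWitnessOut_convert_cmap_to_gmap.1 ≠ pvDiffWitnessOut_convert_cmap_to_gmap.2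
def Claim_exact_convert_cmap_to_gmap : Prop := ∀ (cmap : List (List Int)) (rows : Int) (cols : Int), Dom_convert_cmap_to_gmap cmap rows cols → Pre_convert_cmap_to_gmap cmap rows cols → D_convert_cmap_to_gmap cmap rows cols → convert_cmap_to_gmap cmap rows cols ≠ convert_cmap_to_gmap_alt cmap rows cols

-- ===== LEMMAS AND PROOFS =====

def cellN (g : List (List (List Int))) (r c : Nat) : List Int := (g.getD r []).getD c []
def setN (g : List (List (List Int))) (r c : Nat) (v : List Int) : List (List (List Int)) :=
  g.set r ((g.getD r []).set c v)
def Sh (R C : Nat) (g : List (List (List Int))) : Prop :=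
  g.length = R ∧ ∀ r : Nat, r < R → (g.getD r []).length = C

theorem getD_set' {α : Type} (xs : List α) (i j : Nat) (v d : α) :
    (xs.set i v).getD j d = if j = i ∧ i < xs.length then v else xs.getD j d := by
  simp [List.getD_eq_getElem?_getD, List.getElem?_set]
  split_ifs with h1 h2 h3 <;> simp_all

theorem sh_setN {R C : Nat} {g} (h : Sh R C g) (r c : Nat) (v : List Int) :
    Sh R C (setN g r c v) := by
  obtain ⟨h1, h2⟩ := h
  refine ⟨by simp [setN, h1], fun r' hr' => ?_⟩
  rw [setN, getD_set']
  split_ifs with hc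
  · rw [List.length_set, ← hc.1]; exact h2 r' hr'
  · exact h2 r' hr'

theorem cellN_setN {g} {r c : Nat} (hr : r < g.length) (hc : c < (g.getD r []).length)
    (v : List Int) (r' c' : Nat) :
    cellN (setN g r c v) r' c' = if r' = r ∧ c' = c then v else cellN g r' c' := by
  by_cases hrr : r' = r
  · subst hrr
    have h1 : cellN (setN g r' c v) r' c' = ((g.getD r' []).set c v).getD c' [] := by
      rw [cellN, setN, getD_set']; simp [hr]
    rw [h1, getD_set', cellN]
    split_ifs with p q q
    · rfl
    · exact absurd ⟨rfl, p.1⟩ q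
    · exact absurd ⟨q.2, hc⟩ p
    · rfl
  · have h1 : cellN (setN g r c v) r' c' = cellN g r' c' := by
      rw [cellN, setN, getD_set']; simp [hrr, cellN]
    simp [h1, hrr]

-- bridges from the Python-index primitives to cellN/setN at the index shapes the port uses
theorem aGet2_cast (g) (r c : Nat) : aGet2 g (r:Int) (c:Int) = cellN g r c := by
  simp [aGet2, cellN]
theorem aSet2_cast (g) (r c : Nat) (v) : aSet2 g (r:Int) (c:Int) v = setN g r c v := by
  simp [aSet2, setN]
theorem aGet2_c0 (g) (r : Nat) : aGet2 g (r:Int) 0 = cellN g r 0 := by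
  simpa using aGet2_cast g r 0
theorem aSet2_c0 (g) (r : Nat) (v) : aSet2 g (r:Int) 0 v = setN g r 0 v := by
  simpa using aSet2_cast g r 0 v
theorem aGet2_r0 (g) (c : Nat) : aGet2 g 0 (c:Int) = cellN g 0 c := by
  simpa using aGet2_cast g 0 c
theorem aSet2_r0 (g) (c : Nat) (v) : aSet2 g 0 (c:Int) v = setN g 0 c v := by
  simpa using aSet2_cast g 0 c v

theorem pySetD_neg_one {α : Type} (xs : List α) (v : α) (h : xs ≠ []) :
    PySem.List.pySetD xs (-1) v = xs.set (xs.length - 1) v := by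
  have hl : 0 < xs.length := List.length_pos_iff.mpr h
  simp only [PySem.List.pySetD, PySem.List.pySet?, PySem.List.pyIdx?]
  split_ifs with h1 h2 h3 <;> first | omega | simp

theorem pyGetD_neg_one' {α : Type} (xs : List α) (d : α) (h : xs ≠ []) :
    PySem.List.pyGetD xs (-1) d = xs.getD (xs.length - 1) d := by
  rw [PySem.List.pyGetD_neg_one xs d h, List.getD_eq_getElem _ _ (by have := List.length_pos_iff.mpr h; omega)]
  exact List.getLast_eq_getElem h

theorem aGet2_row_neg (g : List (List (List Int))) (c : Int) (h : g ≠ []) :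
    aGet2 g (-1) c = aGet2 g ((g.length - 1 : Nat) : Int) c := by
  rw [aGet2, aGet2, pyGetD_neg_one' g [] h, PySem.List.pyGetD_natCast]
theorem aSet2_row_neg (g : List (List (List Int))) (c : Int) (v) (h : g ≠ []) :
    aSet2 g (-1) c v = aSet2 g ((g.length - 1 : Nat) : Int) c v := by
  rw [aSet2, aSet2, pyGetD_neg_one' g [] h, pySetD_neg_one g _ h,
      PySem.List.pyGetD_natCast, PySem.List.pySetD_natCast]
theorem aGet2_col_neg (g : List (List (List Int))) (r : Nat) (h : g.getD r [] ≠ []) :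
    aGet2 g (r:Int) (-1) = cellN g r ((g.getD r []).length - 1) := by
  rw [aGet2, PySem.List.pyGetD_natCast, pyGetD_neg_one' _ [] h, cellN]
theorem aSet2_col_neg (g : List (List (List Int))) (r : Nat) (v) (h : g.getD r [] ≠ []) :
    aSet2 g (r:Int) (-1) v = setN g r ((g.getD r []).length - 1) v := by
  rw [aSet2, PySem.List.pyGetD_natCast, pySetD_neg_one _ _ h, PySem.List.pySetD_natCast, setN]

theorem sh_gmap0 (R C : Nat) :
    Sh R C ((PySem.List.pyRange 0 (R:Int) 1).map
      (fun _ => (PySem.List.pyRange 0 (C:Int) 1).map (fun _ => ([] : List Int)))) := by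
  refine ⟨by simp [PySem.List.length_pyRange_one], fun r hr => ?_⟩
  rw [List.getD_eq_getElem?_getD, PySem.List.getElem?_map_pyRange_zero]
  · simp [PySem.List.length_pyRange_one]
  · exact_mod_cast hr

theorem fill_row_spec (cmap : List (List Int)) (R C : Nat) (row : Nat) (hrowR : row < R) :
    ∀ (m : Nat), m ≤ C → ∀ g, Sh R C g →
      Sh R C ((PySem.List.pyRange 0 (m:Int) 1).foldl
          (fun g col => aSet2 g (row:Int) col (tblLookup cmap (row:Int) col)) g) ∧
      ∀ r' c', cellN ((PySem.List.pyRange 0 (m:Int) 1).foldl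
          (fun g col => aSet2 g (row:Int) col (tblLookup cmap (row:Int) col)) g) r' c'
        = if r' = row ∧ c' < m then tblLookup cmap (row:Int) (c':Int) else cellN g r' c' := by
  intro m
  induction m with
  | zero =>
    intro _ g hg
    rw [show ((0:Nat):Int) = 0 by rfl, PySem.List.pyRange_one_eq_nil (by omega)]
    exact ⟨hg, fun r' c' => by simp⟩
  | succ m ih =>
    intro hm g hg
    have hrange : PySem.List.pyRange 0 ((m+1:Nat):Int) 1
        = PySem.List.pyRange 0 (m:Int) 1 ++ [(m:Int)] := by
      push_cast
      exact PySem.List.pyRange_one_succ_right (by positivity)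
    rw [hrange, List.foldl_append, List.foldl_cons, List.foldl_nil]
    obtain ⟨hg1, hcell⟩ := ih (by omega) g hg
    have hr1 : row < ((PySem.List.pyRange 0 (m:Int) 1).foldl
        (fun g col => aSet2 g (row:Int) col (tblLookup cmap (row:Int) col)) g).length := by
      rw [hg1.1]; exact hrowR
    have hc1 : m < (((PySem.List.pyRange 0 (m:Int) 1).foldl
        (fun g col => aSet2 g (row:Int) col (tblLookup cmap (row:Int) col)) g).getD row []).length := by
      rw [hg1.2 row hrowR]; omega
    rw [aSet2_cast]
    refine ⟨sh_setN hg1 _ _ _, fun r' c' => ?_⟩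
    rw [cellN_setN hr1 hc1, hcell r' c']
    split_ifs with p q r <;> first | rfl | omega | (rw [p.2])

theorem fill_spec (cmap : List (List Int)) (R C : Nat) :
    ∀ (k : Nat), k ≤ R → ∀ g, Sh R C g →
      Sh R C ((PySem.List.pyRange 0 (k:Int) 1).foldl
          (fun g row => (PySem.List.pyRange 0 (C:Int) 1).foldl
            (fun g col => aSet2 g row col (tblLookup cmap row col)) g) g) ∧
      ∀ r' c', cellN ((PySem.List.pyRange 0 (k:Int) 1).foldl
          (fun g row => (PySem.List.pyRange 0 (C:Int) 1).foldl
            (fun g col => aSet2 g row col (tblLookup cmap row col)) g) g) r' c'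
        = if r' < k ∧ c' < C then tblLookup cmap (r':Int) (c':Int) else cellN g r' c' := by
  intro k
  induction k with
  | zero =>
    intro _ g hg
    rw [show ((0:Nat):Int) = 0 by rfl, PySem.List.pyRange_one_eq_nil (le_refl (0:Int))]
    exact ⟨hg, fun r' c' => by simp⟩
  | succ k ih =>
    intro hk g hg
    have hrange : PySem.List.pyRange 0 ((k+1:Nat):Int) 1
        = PySem.List.pyRange 0 (k:Int) 1 ++ [(k:Int)] := by
      push_cast
      exact PySem.List.pyRange_one_succ_right (by positivity)
    rw [hrange, List.foldl_append, List.foldl_cons, List.foldl_nil]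
    obtain ⟨hg1, hcell⟩ := ih (by omega) g hg
    obtain ⟨hg2, hcell2⟩ := fill_row_spec cmap R C k (by omega) C (le_refl C) _ hg1
    refine ⟨hg2, fun r' c' => ?_⟩
    rw [hcell2 r' c', hcell r' c']
    by_cases p : r' = k ∧ c' < C
    · rw [if_pos p, if_pos (show r' < k+1 ∧ c' < C by omega), p.1]
    · rw [if_neg p]
      by_cases q : r' < k ∧ c' < C
      · rw [if_pos q, if_pos (show r' < k+1 ∧ c' < C by omega)]
      · rw [if_neg q, if_neg (show ¬(r' < k+1 ∧ c' < C) by omega)]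

set_option maxHeartbeats 1000000 in
theorem lr_spec (cmap : List (List Int)) (R C : Nat) (hC : 1 ≤ C) :
    ∀ (k : Nat), k ≤ R → ∀ g, Sh R C g →
      Sh R C ((PySem.List.pyRange 1 (k:Int) 1).foldl (fun g r =>
          let g := if aGet2 g r 0 = [3,7] then aSet2 g r 0 [4,0] else aSet2 g r 0 [1,2]
          if aGet2 g r (-1) = [3,7] then aSet2 g r (-1) [4,2] else aSet2 g r (-1) [1,0]) g) ∧
      ∀ r' c', cellN ((PySem.List.pyRange 1 (k:Int) 1).foldl (fun g r =>
          let g := if aGet2 g r 0 = [3,7] then aSet2 g r 0 [4,0] else aSet2 g r 0 [1,2]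
          if aGet2 g r (-1) = [3,7] then aSet2 g r (-1) [4,2] else aSet2 g r (-1) [1,0]) g) r' c'
        = if 1 ≤ r' ∧ r' < k then
            (if c' = C-1 then (if C = 1 then [1,0] else if cellN g r' (C-1) = [3,7] then [4,2] else [1,0])
             else if c' = 0 then (if cellN g r' 0 = [3,7] then [4,0] else [1,2])
             else cellN g r' c')
          else cellN g r' c' := by
  intro k
  induction k with
  | zero =>
    intro _ g hg
    rw [PySem.List.pyRange_one_eq_nil (show ((0:Nat):Int) ≤ (1:Int) by simp)]
    exact ⟨hg, fun r' c' => by rw [List.foldl_nil, if_neg (by omega)]⟩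
  | succ k ih =>
    intro hk g hg
    by_cases hk0 : k = 0
    · subst hk0
      rw [PySem.List.pyRange_one_eq_nil (show ((0+1:Nat):Int) ≤ (1:Int) by simp)]
      exact ⟨hg, fun r' c' => by rw [List.foldl_nil, if_neg (by omega)]⟩
    · have hk1 : 1 ≤ k := by omega
      have hrange : PySem.List.pyRange 1 ((k+1:Nat):Int) 1
          = PySem.List.pyRange 1 (k:Int) 1 ++ [(k:Int)] := by
        push_cast
        exact PySem.List.pyRange_one_succ_right (by exact_mod_cast hk1)
      rw [hrange, List.foldl_append, List.foldl_cons, List.foldl_nil]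
      obtain ⟨hg1, hcell1⟩ := ih (by omega) g hg
      dsimp only
      set g1 := (PySem.List.pyRange 1 (k:Int) 1).foldl (fun g r =>
          let g := if aGet2 g r 0 = [3,7] then aSet2 g r 0 [4,0] else aSet2 g r 0 [1,2]
          if aGet2 g r (-1) = [3,7] then aSet2 g r (-1) [4,2] else aSet2 g r (-1) [1,0]) g with hg1def
      have hkR : k < R := by omega
      have hA : aGet2 g1 (k:Int) 0 = cellN g k 0 := by
        rw [aGet2_c0, hcell1 k 0, if_neg (by omega)]
      set X : List Int := if cellN g k 0 = [3,7] then [4,0] else [1,2] with hXdef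
      have hXne : X ≠ [3,7] := by rw [hXdef]; split_ifs <;> decide
      have hg2eq : (if aGet2 g1 (k:Int) 0 = [3,7] then aSet2 g1 (k:Int) 0 [4,0]
          else aSet2 g1 (k:Int) 0 [1,2]) = setN g1 k 0 X := by
        rw [hA, hXdef]; split_ifs <;> rw [aSet2_c0]
      rw [hg2eq]
      have hg2 : Sh R C (setN g1 k 0 X) := sh_setN hg1 k 0 X
      have hrow2len : ((setN g1 k 0 X).getD k []).length = C := hg2.2 k hkR
      have hrow2ne : (setN g1 k 0 X).getD k [] ≠ [] := by
        intro h; rw [h] at hrow2len; simp at hrow2len; omega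
      have hlen1 : k < g1.length := by rw [hg1.1]; exact hkR
      have hclen1 : 0 < (g1.getD k []).length := by rw [hg1.2 k hkR]; omega
      have hB : aGet2 (setN g1 k 0 X) (k:Int) (-1)
          = if C = 1 then X else cellN g k (C-1) := by
        rw [aGet2_col_neg _ _ hrow2ne, hrow2len,
            cellN_setN hlen1 hclen1 X k (C-1)]
        by_cases h1 : C = 1
        · rw [if_pos ⟨rfl, by omega⟩, if_pos h1]
        · rw [if_neg (by omega), if_neg h1, hcell1 k (C-1), if_neg (by omega)]
      have houter : (if aGet2 (setN g1 k 0 X) (k:Int) (-1) = [3,7]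
            then aSet2 (setN g1 k 0 X) (k:Int) (-1) [4,2]
            else aSet2 (setN g1 k 0 X) (k:Int) (-1) [1,0])
          = setN (setN g1 k 0 X) k (C-1)
              (if (if C = 1 then X else cellN g k (C-1)) = [3,7] then [4,2] else [1,0]) := by
        rw [hB]; split_ifs <;> rw [aSet2_col_neg _ _ _ hrow2ne, hrow2len]
      rw [houter]
      set Y : List Int := if (if C = 1 then X else cellN g k (C-1)) = [3,7] then [4,2] else [1,0] with hYdef
      refine ⟨sh_setN hg2 _ _ _, fun r' c' => ?_⟩
      have hlen2 : k < (setN g1 k 0 X).length := by rw [hg2.1]; exact hkR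
      have hclen2 : C-1 < ((setN g1 k 0 X).getD k []).length := by rw [hrow2len]; omega
      rw [cellN_setN hlen2 hclen2 Y r' c', cellN_setN hlen1 (by omega) X r' c', hcell1 r' c']
      by_cases m1 : r' = k
      · rw [m1]
        by_cases m2 : c' = C-1
        · rw [m2]
          rw [if_pos ⟨rfl, rfl⟩, if_pos (show 1 ≤ k ∧ k < k+1 by omega), if_pos rfl, hYdef]
          by_cases hC1 : C = 1
          · rw [if_pos hC1, if_pos hC1, if_neg hXne]
          · rw [if_neg hC1, if_neg hC1]
        · rw [if_neg (fun h => m2 h.2), if_pos (show 1 ≤ k ∧ k < k+1 by omega), if_neg m2]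
          by_cases m3 : c' = 0
          · rw [m3, if_pos ⟨rfl, rfl⟩, if_pos rfl, hXdef]
          · rw [if_neg (fun h => m3 h.2), if_neg m3, if_neg (by omega)]
      · rw [if_neg (fun h => m1 h.1), if_neg (fun h => m1 h.1)]
        by_cases m4 : 1 ≤ r' ∧ r' < k
        · rw [if_pos m4, if_pos (show 1 ≤ r' ∧ r' < k+1 by omega)]
        · rw [if_neg m4, if_neg (show ¬(1 ≤ r' ∧ r' < k+1) by omega)]

set_option maxHeartbeats 1000000 in
theorem ud_spec (cmap : List (List Int)) (R C : Nat) (hR : 1 ≤ R) :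
    ∀ (k : Nat), k ≤ C → ∀ g, Sh R C g →
      Sh R C ((PySem.List.pyRange 1 (k:Int) 1).foldl (fun g c =>
          let g := if aGet2 g 0 c = [3,7] then aSet2 g 0 c [3,1] else aSet2 g 0 c [2,1]
          if aGet2 g (-1) c = [3,7] then aSet2 g (-1) c [5,1] else aSet2 g (-1) c [0,1]) g) ∧
      ∀ r' c', cellN ((PySem.List.pyRange 1 (k:Int) 1).foldl (fun g c =>
          let g := if aGet2 g 0 c = [3,7] then aSet2 g 0 c [3,1] else aSet2 g 0 c [2,1]
          if aGet2 g (-1) c = [3,7] then aSet2 g (-1) c [5,1] else aSet2 g (-1) c [0,1]) g) r' c'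
        = if 1 ≤ c' ∧ c' < k then
            (if r' = R-1 then (if R = 1 then [0,1] else if cellN g (R-1) c' = [3,7] then [5,1] else [0,1])
             else if r' = 0 then (if cellN g 0 c' = [3,7] then [3,1] else [2,1])
             else cellN g r' c')
          else cellN g r' c' := by
  intro k
  induction k with
  | zero =>
    intro _ g hg
    rw [PySem.List.pyRange_one_eq_nil (show ((0:Nat):Int) ≤ (1:Int) by simp)]
    exact ⟨hg, fun r' c' => by rw [List.foldl_nil, if_neg (by omega)]⟩
  | succ k ih =>
    intro hk g hg
    by_cases hk0 : k = 0
    · subst hk0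
      rw [PySem.List.pyRange_one_eq_nil (show ((0+1:Nat):Int) ≤ (1:Int) by simp)]
      exact ⟨hg, fun r' c' => by rw [List.foldl_nil, if_neg (by omega)]⟩
    · have hk1 : 1 ≤ k := by omega
      have hrange : PySem.List.pyRange 1 ((k+1:Nat):Int) 1
          = PySem.List.pyRange 1 (k:Int) 1 ++ [(k:Int)] := by
        push_cast
        exact PySem.List.pyRange_one_succ_right (by exact_mod_cast hk1)
      rw [hrange, List.foldl_append, List.foldl_cons, List.foldl_nil]
      obtain ⟨hg1, hcell1⟩ := ih (by omega) g hg
      dsimp only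
      set g1 := (PySem.List.pyRange 1 (k:Int) 1).foldl (fun g c =>
          let g := if aGet2 g 0 c = [3,7] then aSet2 g 0 c [3,1] else aSet2 g 0 c [2,1]
          if aGet2 g (-1) c = [3,7] then aSet2 g (-1) c [5,1] else aSet2 g (-1) c [0,1]) g with hg1def
      have hkC : k < C := by omega
      have h0R : 0 < R := by omega
      have hA : aGet2 g1 0 (k:Int) = cellN g 0 k := by
        rw [aGet2_r0, hcell1 0 k, if_neg (by omega)]
      set X : List Int := if cellN g 0 k = [3,7] then [3,1] else [2,1] with hXdef
      have hXne : X ≠ [3,7] := by rw [hXdef]; split_ifs <;> decide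
      have hg2eq : (if aGet2 g1 0 (k:Int) = [3,7] then aSet2 g1 0 (k:Int) [3,1]
          else aSet2 g1 0 (k:Int) [2,1]) = setN g1 0 k X := by
        rw [hA, hXdef]; split_ifs <;> rw [aSet2_r0]
      rw [hg2eq]
      have hg2 : Sh R C (setN g1 0 k X) := sh_setN hg1 0 k X
      have hg2ne : setN g1 0 k X ≠ [] := by
        intro h
        have := hg2.1
        rw [h] at this
        simp at this
        omega
      have hlen1 : 0 < g1.length := by rw [hg1.1]; omega
      have hclen1 : k < (g1.getD 0 []).length := by rw [hg1.2 0 h0R]; omega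
      have hg2len : (setN g1 0 k X).length = R := hg2.1
      have hB : aGet2 (setN g1 0 k X) (-1) (k:Int)
          = if R = 1 then X else cellN g (R-1) k := by
        rw [aGet2_row_neg _ _ hg2ne, hg2len, aGet2_cast,
            cellN_setN hlen1 hclen1 X (R-1) k]
        by_cases h1 : R = 1
        · rw [if_pos ⟨by omega, rfl⟩, if_pos h1]
        · rw [if_neg (by omega), if_neg h1, hcell1 (R-1) k, if_neg (by omega)]
      have houter : (if aGet2 (setN g1 0 k X) (-1) (k:Int) = [3,7]
            then aSet2 (setN g1 0 k X) (-1) (k:Int) [5,1]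
            else aSet2 (setN g1 0 k X) (-1) (k:Int) [0,1])
          = setN (setN g1 0 k X) (R-1) k
              (if (if R = 1 then X else cellN g (R-1) k) = [3,7] then [5,1] else [0,1]) := by
        rw [hB]
        split_ifs <;> rw [aSet2_row_neg _ _ _ hg2ne, hg2len, aSet2_cast]
      rw [houter]
      set Y : List Int := if (if R = 1 then X else cellN g (R-1) k) = [3,7] then [5,1] else [0,1] with hYdef
      refine ⟨sh_setN hg2 _ _ _, fun r' c' => ?_⟩
      have hlen2 : R-1 < (setN g1 0 k X).length := by rw [hg2len]; omega
      have hclen2 : k < ((setN g1 0 k X).getD (R-1) []).length := by rw [hg2.2 (R-1) (by omega)]; omega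
      rw [cellN_setN hlen2 hclen2 Y r' c', cellN_setN (by omega) hclen1 X r' c', hcell1 r' c']
      by_cases m1 : c' = k
      · rw [m1]
        by_cases m2 : r' = R-1
        · rw [m2]
          rw [if_pos ⟨rfl, rfl⟩, if_pos (show 1 ≤ k ∧ k < k+1 by omega), if_pos rfl, hYdef]
          by_cases hR1 : R = 1
          · rw [if_pos hR1, if_pos hR1, if_neg hXne]
          · rw [if_neg hR1, if_neg hR1]
        · rw [if_neg (fun h => m2 h.1), if_pos (show 1 ≤ k ∧ k < k+1 by omega), if_neg m2]
          by_cases m3 : r' = 0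
          · rw [m3, if_pos ⟨rfl, rfl⟩, if_pos rfl, hXdef]
          · rw [if_neg (fun h => m3 h.1), if_neg m3, if_neg (by omega)]
      · rw [if_neg (fun h => m1 h.2), if_neg (fun h => m1 h.2)]
        by_cases m4 : 1 ≤ c' ∧ c' < k
        · rw [if_pos m4, if_pos (show 1 ≤ c' ∧ c' < k+1 by omega)]
        · rw [if_neg m4, if_neg (show ¬(1 ≤ c' ∧ c' < k+1) by omega)]

set_option maxHeartbeats 1000000 in
theorem corners_spec (R C : Nat) (hR : 1 ≤ R) (hC : 1 ≤ C) (g) (hg : Sh R C g) :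
    Sh R C (aSet2 (aSet2 (aSet2 (aSet2 g 0 0 [3,0]) 0 (-1) [3,2]) (-1) 0 [5,0]) (-1) (-1) [5,2]) ∧
    ∀ r' c', cellN (aSet2 (aSet2 (aSet2 (aSet2 g 0 0 [3,0]) 0 (-1) [3,2]) (-1) 0 [5,0]) (-1) (-1) [5,2]) r' c'
      = if r' = R-1 ∧ c' = C-1 then [5,2]
        else if r' = R-1 ∧ c' = 0 then [5,0]
        else if r' = 0 ∧ c' = C-1 then [3,2]
        else if r' = 0 ∧ c' = 0 then [3,0]
        else cellN g r' c' := by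
  have h0R : 0 < R := by omega
  have e4 : aSet2 g 0 0 [3,0] = setN g 0 0 [3,0] := by
    have := aSet2_cast g 0 0 [3,0]; simpa using this
  have hg4 : Sh R C (setN g 0 0 [3,0]) := sh_setN hg 0 0 _
  have hrow4ne : (setN g 0 0 [3,0]).getD 0 [] ≠ [] := by
    intro h; have := hg4.2 0 h0R; rw [h] at this; simp at this; omega
  have e5 : aSet2 (setN g 0 0 [3,0]) 0 (-1) [3,2]
      = setN (setN g 0 0 [3,0]) 0 (C-1) [3,2] := by
    have := aSet2_col_neg (setN g 0 0 [3,0]) 0 [3,2] hrow4ne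
    rw [hg4.2 0 h0R] at this; simpa using this
  have hg5 : Sh R C (setN (setN g 0 0 [3,0]) 0 (C-1) [3,2]) := sh_setN hg4 _ _ _
  have hg5ne : setN (setN g 0 0 [3,0]) 0 (C-1) [3,2] ≠ [] := by
    intro h; have := hg5.1; rw [h] at this; simp at this; omega
  have e6 : aSet2 (setN (setN g 0 0 [3,0]) 0 (C-1) [3,2]) (-1) 0 [5,0]
      = setN (setN (setN g 0 0 [3,0]) 0 (C-1) [3,2]) (R-1) 0 [5,0] := by
    rw [aSet2_row_neg _ _ _ hg5ne, hg5.1, aSet2_c0]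
  have hg6 : Sh R C (setN (setN (setN g 0 0 [3,0]) 0 (C-1) [3,2]) (R-1) 0 [5,0]) := sh_setN hg5 _ _ _
  have hg6ne : setN (setN (setN g 0 0 [3,0]) 0 (C-1) [3,2]) (R-1) 0 [5,0] ≠ [] := by
    intro h; have := hg6.1; rw [h] at this; simp at this; omega
  have hrow6ne : (setN (setN (setN g 0 0 [3,0]) 0 (C-1) [3,2]) (R-1) 0 [5,0]).getD (R-1) [] ≠ [] := by
    intro h; have := hg6.2 (R-1) (by omega); rw [h] at this; simp at this; omega
  have e7 : aSet2 (setN (setN (setN g 0 0 [3,0]) 0 (C-1) [3,2]) (R-1) 0 [5,0]) (-1) (-1) [5,2]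
      = setN (setN (setN (setN g 0 0 [3,0]) 0 (C-1) [3,2]) (R-1) 0 [5,0]) (R-1) (C-1) [5,2] := by
    rw [aSet2_row_neg _ _ _ hg6ne, hg6.1, aSet2_col_neg _ _ _ hrow6ne, hg6.2 (R-1) (by omega)]
  rw [e4, e5, e6, e7]
  refine ⟨sh_setN hg6 _ _ _, fun r' c' => ?_⟩
  rw [cellN_setN (by rw [hg6.1]; omega) (by rw [hg6.2 (R-1) (by omega)]; omega) _ r' c',
      cellN_setN (by rw [hg5.1]; omega) (by rw [hg5.2 (R-1) (by omega)]; omega) _ r' c',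
      cellN_setN (by rw [hg4.1]; omega) (by rw [hg4.2 0 h0R]; omega) _ r' c',
      cellN_setN (by rw [hg.1]; omega) (by rw [hg.2 0 h0R]; omega) _ r' c']

-- A's per-cell result after the three patch passes (as established by fill/lr/ud_spec)
def tgtCell (cmap : List (List Int)) (R C r c : Nat) : List Int :=
  if c = C-1 then (if C = 1 then [1,0] else if tblLookup cmap (r:Int) (c:Int) = [3,7] then [4,2] else [1,0])
  else if c = 0 then (if tblLookup cmap (r:Int) (c:Int) = [3,7] then [4,0] else [1,2])
  else if r = R-1 then (if R = 1 then [0,1] else if tblLookup cmap (r:Int) (c:Int) = [3,7] then [5,1] else [0,1])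
  else if r = 0 then (if tblLookup cmap (r:Int) (c:Int) = [3,7] then [3,1] else [2,1])
  else tblLookup cmap (r:Int) (c:Int)

-- the 16-entry table hits [3,7] exactly at indices 0 and -16
theorem table_entry (v : Int) (h1 : -16 ≤ v) (h2 : v < 16) :
    (PySem.List.pyGetD cm2gm v [] = [3,7]) ↔ v % 16 = 0 := by
  interval_cases v <;> decide

theorem blocked_iff (cmap : List (List Int)) (rows cols : Int)
    (hPre : Pre_convert_cmap_to_gmap cmap rows cols) (r c : Nat)
    (hr : (r:Int) < rows) (hc : (c:Int) < cols) :
    (tblLookup cmap (r:Int) (c:Int) = [3,7]) ↔ ((cmap.getD r []).getD c 1) % 16 = 0 := by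
  obtain ⟨h1, h2, h3, h4⟩ := hPre
  have hrlen : r < cmap.length := by omega
  have hrowmem : cmap.getD r [] ∈ cmap.take rows.toNat := by
    have hrt : r < (cmap.take rows.toNat).length := by
      rw [List.length_take]; omega
    have he : (cmap.take rows.toNat)[r] = cmap.getD r [] := by
      rw [List.getElem_take, List.getD_eq_getElem cmap [] hrlen]
    rw [← he]; exact List.getElem_mem hrt
  obtain ⟨hclen, hvals⟩ := h4 _ hrowmem
  have hclen' : c < (cmap.getD r []).length := by omega
  have hvmem : (cmap.getD r []).getD c 1 ∈ (cmap.getD r []).take cols.toNat := by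
    have hct : c < ((cmap.getD r []).take cols.toNat).length := by
      rw [List.length_take]; omega
    have he : ((cmap.getD r []).take cols.toNat)[c] = (cmap.getD r []).getD c 1 := by
      rw [List.getElem_take, List.getD_eq_getElem _ 1 hclen']
    rw [← he]; exact List.getElem_mem hct
  obtain ⟨hlb, hub⟩ := hvals _ hvmem
  have hval : PySem.List.pyGetD (PySem.List.pyGetD cmap (r:Int) []) (c:Int) 0
      = (cmap.getD r []).getD c 1 := by
    rw [PySem.List.pyGetD_natCast, PySem.List.pyGetD_natCast,
        List.getD_eq_getElem _ _ hclen', List.getD_eq_getElem _ _ hclen']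
  rw [tblLookup, hval]
  exact table_entry _ hlb hub

theorem bCell_eq_tgt (cmap : List (List Int)) (R C r c : Nat)
    (hR : 1 ≤ R) (hC : 1 ≤ C) (hr : r < R) (hc : c < C)
    (hA : c = C-1 → C = 1 → tblLookup cmap (r:Int) (c:Int) ≠ [3,7])
    (hB : c ≠ 0 → c ≠ C-1 → r = R-1 → R = 1 → tblLookup cmap (r:Int) (c:Int) ≠ [3,7]) :
    bCell cmap (R:Int) (C:Int) (r:Int) (c:Int) = tgtCell cmap R C r c := by
  simp only [bCell, tgtCell]
  by_cases hcC : c = C-1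
  · rw [if_pos (Or.inr (show (c:Int) = (C:Int)-1 by omega)),
        if_pos (show (c:Int) = (C:Int)-1 by omega), if_pos hcC]
    by_cases hC1 : C = 1
    · rw [if_pos hC1, if_neg (hA hcC hC1)]
    · rw [if_neg hC1]
  · by_cases hc0 : c = 0
    · rw [if_pos (Or.inl (show (c:Int) = 0 by omega)),
          if_neg (show ¬((c:Int) = (C:Int)-1) by omega), if_neg hcC, if_pos hc0]
    · rw [if_neg (show ¬((c:Int) = 0 ∨ (c:Int) = (C:Int)-1) by omega), if_neg hcC, if_neg hc0]
      by_cases hrR : r = R-1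
      · rw [if_pos (Or.inr (show (r:Int) = (R:Int)-1 by omega)),
            if_pos (show (r:Int) = (R:Int)-1 by omega), if_pos hrR]
        by_cases hR1 : R = 1
        · rw [if_pos hR1, if_neg (hB hc0 hcC hrR hR1)]
        · rw [if_neg hR1]
      · by_cases hr0 : r = 0
        · rw [if_pos (Or.inl (show (r:Int) = 0 by omega)),
              if_neg (show ¬((r:Int) = (R:Int)-1) by omega), if_neg hrR, if_pos hr0]
        · rw [if_neg (show ¬((r:Int) = 0 ∨ (r:Int) = (R:Int)-1) by omega), if_neg hrR, if_neg hr0]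

theorem eq_of_cell (X Y : List (List (List Int))) (R C : Nat)
    (hx1 : X.length = R) (hx2 : ∀ r, r < R → (X.getD r []).length = C)
    (hy1 : Y.length = R) (hy2 : ∀ r, r < R → (Y.getD r []).length = C)
    (h : ∀ r c, r < R → c < C → cellN X r c = cellN Y r c) : X = Y := by
  apply List.ext_getElem (by rw [hx1, hy1])
  intro n h1 h2
  have hnR : n < R := by rw [hx1] at h1; exact h1
  have hgx : X.getD n [] = X[n] := List.getD_eq_getElem X [] h1
  have hgy : Y.getD n [] = Y[n] := List.getD_eq_getElem Y [] h2
  apply List.ext_getElem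
  · rw [← hgx, ← hgy, hx2 n hnR, hy2 n hnR]
  · intro m hm1 hm2
    have hmC : m < C := by rw [← hgx, hx2 n hnR] at hm1; exact hm1
    have hcell := h n m hnR hmC
    have ex : (X.getD n []).getD m [] = X[n][m] := by
      rw [hgx]; exact List.getD_eq_getElem _ [] hm1
    have ey : (Y.getD n []).getD m [] = Y[n][m] := by
      rw [hgy]; exact List.getD_eq_getElem _ [] hm2
    rw [cellN, cellN, ex, ey] at hcell
    exact hcell

theorem alt_row (cmap : List (List Int)) (R C : Nat) (r : Nat) (hr : r < R) :
    ((PySem.List.pyRange 0 (R:Int) 1).map (fun rr => (PySem.List.pyRange 0 (C:Int) 1).map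
        (fun cc => bCell cmap (R:Int) (C:Int) rr cc))).getD r []
      = (PySem.List.pyRange 0 (C:Int) 1).map (fun cc => bCell cmap (R:Int) (C:Int) (r:Int) cc) := by
  rw [List.getD_eq_getElem?_getD, PySem.List.getElem?_map_pyRange_zero]
  · simp
  · exact_mod_cast hr

theorem alt_rowlen (cmap : List (List Int)) (R C : Nat) (r : Nat) (hr : r < R) :
    (((PySem.List.pyRange 0 (R:Int) 1).map (fun rr => (PySem.List.pyRange 0 (C:Int) 1).map
        (fun cc => bCell cmap (R:Int) (C:Int) rr cc))).getD r []).length = C := by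
  rw [alt_row cmap R C r hr]
  simp [PySem.List.length_pyRange_one]

theorem alt_cell (cmap : List (List Int)) (R C : Nat) (r c : Nat) (hr : r < R) (hc : c < C) :
    cellN ((PySem.List.pyRange 0 (R:Int) 1).map (fun rr => (PySem.List.pyRange 0 (C:Int) 1).map
        (fun cc => bCell cmap (R:Int) (C:Int) rr cc))) r c
      = bCell cmap (R:Int) (C:Int) (r:Int) (c:Int) := by
  rw [cellN, alt_row cmap R C r hr, List.getD_eq_getElem?_getD,
      PySem.List.getElem?_map_pyRange_zero]
  · simp
  · exact_mod_cast hc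

-- ===== VERDICT (by name: the statements are the Claim_ definitions above) =====
set_option maxHeartbeats 2000000 in
theorem convert_cmap_to_gmap_spec : Claim_unchanged_convert_cmap_to_gmap := by
  intro cmap rows cols _hDom hPre
  intro hnd
  have hPre' := hPre
  obtain ⟨hr1, hc1, _h3, _h4⟩ := hPre'
  unfold convert_cmap_to_gmap convert_cmap_to_gmap_alt
  set R := rows.toNat with hRdef
  set C := cols.toNat with hCdef
  have hR : 1 ≤ R := by omega
  have hC : 1 ≤ C := by omega
  have hrows : rows = (R:Int) := by omega
  have hcols : cols = (C:Int) := by omega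
  rw [hrows, hcols, show (R:Int) - 1 = ((R-1:Nat):Int) by omega,
      show (C:Int) - 1 = ((C-1:Nat):Int) by omega]
  dsimp only
  obtain ⟨sh1, f1⟩ := fill_spec cmap R C R (le_refl R) _ (sh_gmap0 R C)
  obtain ⟨sh2, f2⟩ := lr_spec cmap R C hC (R-1) (by omega) _ sh1
  obtain ⟨sh3, f3⟩ := ud_spec cmap R C hR (C-1) (by omega) _ sh2
  obtain ⟨sh4, f4⟩ := corners_spec R C hR hC _ sh3
  have shM : Sh R C ((PySem.List.pyRange 0 (R:Int) 1).map (fun r =>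
      (PySem.List.pyRange 0 (C:Int) 1).map (fun c => bCell cmap (R:Int) (C:Int) r c))) :=
    ⟨by simp [PySem.List.length_pyRange_one], fun r hr => alt_rowlen cmap R C r hr⟩
  obtain ⟨sh4B, f4B⟩ := corners_spec R C hR hC _ shM
  apply eq_of_cell _ _ R C sh4.1 (fun r hr => sh4.2 r hr) sh4B.1 (fun r hr => sh4B.2 r hr)
  intro r c hr hc
  rw [f4 r c, f4B r c]
  by_cases b1 : r = R-1 ∧ c = C-1
  · simp only [if_pos b1]
  · simp only [if_neg b1]
    by_cases b2 : r = R-1 ∧ c = 0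
    · simp only [if_pos b2]
    · simp only [if_neg b2]
      by_cases b3 : r = 0 ∧ c = C-1
      · simp only [if_pos b3]
      · simp only [if_neg b3]
        by_cases b4 : r = 0 ∧ c = 0
        · simp only [if_pos b4]
        · simp only [if_neg b4]
          have hA : c = C-1 → C = 1 → tblLookup cmap (r:Int) (c:Int) ≠ [3,7] := by
            intro hcC hC1 hL
            have hc0 : c = 0 := by omega
            apply hnd
            left
            refine ⟨by omega, by omega, r, by omega, by omega, ?_⟩
            have := (blocked_iff cmap rows cols hPre r 0 (by omega) (by omega)).mp
            rw [hc0] at hL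
            exact this (by simpa using hL)
          have hB : c ≠ 0 → c ≠ C-1 → r = R-1 → R = 1 → tblLookup cmap (r:Int) (c:Int) ≠ [3,7] := by
            intro hc0 hcC hrR hR1 hL
            have hr0 : r = 0 := by omega
            apply hnd
            right
            refine ⟨by omega, by omega, c, by omega, by omega, ?_⟩
            have := (blocked_iff cmap rows cols hPre 0 c (by omega) (by omega)).mp
            rw [hr0] at hL
            exact this (by simpa using hL)
          rw [alt_cell cmap R C r c hr hc, bCell_eq_tgt cmap R C r c hR hC hr hc hA hB, tgtCell]
          rw [f3 r c]
          by_cases b5 : c = C-1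
          · simp only [if_neg (show ¬(1 ≤ c ∧ c < C-1) by omega)]
            rw [f2 r c]
            simp only [if_pos (show 1 ≤ r ∧ r < R-1 by omega), if_pos b5]
            rw [f1 r (C-1)]
            simp only [if_pos (show r < R ∧ C-1 < C by omega)]
            rw [b5]
          · by_cases b6 : c = 0
            · simp only [if_neg (show ¬(1 ≤ c ∧ c < C-1) by omega)]
              rw [f2 r c]
              simp only [if_pos (show 1 ≤ r ∧ r < R-1 by omega), if_neg b5, if_pos b6]
              rw [f1 r 0]
              simp only [if_pos (show r < R ∧ 0 < C by omega)]
              rw [b6]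
            · simp only [if_pos (show 1 ≤ c ∧ c < C-1 by omega)]
              by_cases b7 : r = R-1
              · simp only [if_pos b7, if_neg b5, if_neg b6]
                rw [f2 (R-1) c]
                simp only [if_neg (show ¬(1 ≤ R-1 ∧ R-1 < R-1) by omega)]
                rw [f1 (R-1) c]
                simp only [if_pos (show R-1 < R ∧ c < C by omega)]
                rw [b7]
              · by_cases b8 : r = 0
                · simp only [if_neg b7, if_pos b8, if_neg b5, if_neg b6]
                  rw [f2 0 c]
                  simp only [if_neg (show ¬(1 ≤ 0 ∧ 0 < R-1) by omega)]
                  rw [f1 0 c]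
                  simp only [if_pos (show 0 < R ∧ c < C by omega)]
                  rw [b8]
                · simp only [if_neg b7, if_neg b8, if_neg b5, if_neg b6]
                  rw [f2 r c]
                  simp only [if_neg b5, if_neg b6, ite_self]
                  rw [f1 r c]
                  simp only [if_pos (show r < R ∧ c < C by omega)]

theorem convert_cmap_to_gmap_changed : Claim_changed_convert_cmap_to_gmap := by
  unfold Claim_changed_convert_cmap_to_gmap; decide

set_option maxHeartbeats 2000000 in
theorem convert_cmap_to_gmap_tight : Claim_exact_convert_cmap_to_gmap := by
  intro cmap rows cols _hDom hPre hD heq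
  have hPre' := hPre
  obtain ⟨hr1, hc1, _h3, _h4⟩ := hPre'
  rw [convert_cmap_to_gmap, convert_cmap_to_gmap_alt] at heq
  set R := rows.toNat with hRdef
  set C := cols.toNat with hCdef
  have hR : 1 ≤ R := by omega
  have hC : 1 ≤ C := by omega
  have hrows : rows = (R:Int) := by omega
  have hcols : cols = (C:Int) := by omega
  rw [hrows, hcols, show (R:Int) - 1 = ((R-1:Nat):Int) by omega,
      show (C:Int) - 1 = ((C-1:Nat):Int) by omega] at heq
  dsimp only at heq
  obtain ⟨sh1, f1⟩ := fill_spec cmap R C R (le_refl R) _ (sh_gmap0 R C)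
  obtain ⟨sh2, f2⟩ := lr_spec cmap R C hC (R-1) (by omega) _ sh1
  obtain ⟨sh3, f3⟩ := ud_spec cmap R C hR (C-1) (by omega) _ sh2
  obtain ⟨sh4, f4⟩ := corners_spec R C hR hC _ sh3
  have shM : Sh R C ((PySem.List.pyRange 0 (R:Int) 1).map (fun r =>
      (PySem.List.pyRange 0 (C:Int) 1).map (fun c => bCell cmap (R:Int) (C:Int) r c))) :=
    ⟨by simp [PySem.List.length_pyRange_one], fun r hr => alt_rowlen cmap R C r hr⟩
  obtain ⟨sh4B, f4B⟩ := corners_spec R C hR hC _ shM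
  rcases hD with ⟨hcols1, hrows3, r, hrlt, hr1', hmod⟩ | ⟨hrows1, hcols3, c, hclt, hc1', hmod⟩
  · -- one-column grid, blocked interior row r: A gives [1,0], B gives [4,2] at (r,0)
    have hC1 : C = 1 := by omega
    have hblk : tblLookup cmap (r:Int) (0:Int) = [3,7] :=
      (blocked_iff cmap rows cols hPre r 0 (by omega) (by omega)).mpr hmod
    have hcells := congrArg (fun g => cellN g r 0) heq
    dsimp only at hcells
    rw [f4 r 0, f4B r 0] at hcells
    simp only [if_neg (show ¬(r = R-1 ∧ (0:Nat) = C-1) by omega),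
        if_neg (show ¬(r = R-1 ∧ (0:Nat) = 0) by omega),
        if_neg (show ¬(r = 0 ∧ (0:Nat) = C-1) by omega),
        if_neg (show ¬(r = 0 ∧ (0:Nat) = 0) by omega)] at hcells
    rw [f3 r 0] at hcells
    simp only [if_neg (show ¬(1 ≤ (0:Nat) ∧ (0:Nat) < C-1) by omega)] at hcells
    rw [f2 r 0] at hcells
    simp only [if_pos (show 1 ≤ r ∧ r < R-1 by omega),
        if_pos (show (0:Nat) = C-1 by omega), if_pos hC1] at hcells
    rw [alt_cell cmap R C r 0 (by omega) (by omega)] at hcells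
    have hb : bCell cmap (R:Int) (C:Int) (r:Int) ((0:Nat):Int) = [4,2] := by
      simp only [bCell]
      rw [if_pos (Or.inl (by simp)), if_pos (show ((0:Nat):Int) = (C:Int)-1 by omega),
          if_pos (by simpa using hblk)]
    rw [hb] at hcells
    split_ifs at hcells with hx hy
    · exact absurd hx.1 (by omega)
    · exact absurd hy.1 (by omega)
    · exact absurd hcells (by decide)
  · -- one-row grid, blocked interior column c: A gives [0,1], B gives [5,1] at (0,c)
    have hR1 : R = 1 := by omega
    have hblk : tblLookup cmap (0:Int) (c:Int) = [3,7] :=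
      (blocked_iff cmap rows cols hPre 0 c (by omega) (by omega)).mpr hmod
    have hcells := congrArg (fun g => cellN g 0 c) heq
    dsimp only at hcells
    rw [f4 0 c, f4B 0 c] at hcells
    simp only [if_neg (show ¬((0:Nat) = R-1 ∧ c = C-1) by omega),
        if_neg (show ¬((0:Nat) = R-1 ∧ c = 0) by omega),
        if_neg (show ¬((0:Nat) = 0 ∧ c = C-1) by omega),
        if_neg (show ¬((0:Nat) = 0 ∧ c = 0) by omega)] at hcells
    rw [f3 0 c] at hcells
    simp only [if_pos (show 1 ≤ c ∧ c < C-1 by omega),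
        if_pos (show (0:Nat) = R-1 by omega), if_pos hR1] at hcells
    rw [alt_cell cmap R C 0 c (by omega) (by omega)] at hcells
    have hb : bCell cmap (R:Int) (C:Int) ((0:Nat):Int) (c:Int) = [5,1] := by
      simp only [bCell]
      rw [if_neg (show ¬((c:Int) = 0 ∨ (c:Int) = (C:Int)-1) by omega),
          if_pos (Or.inl (by simp)), if_pos (show ((0:Nat):Int) = (R:Int)-1 by omega),
          if_pos (by simpa using hblk)]
    rw [hb] at hcells
    split_ifs at hcells with hx hy
    · exact absurd hx.2 (by omega)
    · exact absurd hy.2 (by omega)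
    · exact absurd hcells (by decide)
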